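-- pv_equiv track=rewrite | github.com/arnavkots1/StratMancer | backend/services/draft_analyzer.py | _identify_comp_weaknesses
-- ===== SOURCE A (Python) =====
-- from typing import Dict, List, Any, Optional
--
-- def _identify_comp_weaknesses(picks: Dict[str, Dict], comp_type: str) -> List[str]:
--     """Identify team composition weaknesses"""
--     weaknesses = []
--
--     # Check for squishy team
--     tank_count = sum(1 for p in picks.values() if 'Tank' in p.get('tags', {}).get('class', []))
--     if tank_count == 0:
--         weaknesses.append("Lacks frontline/tankiness")
--
--     # Check for engage
--     engage_count = sum(1 for p in picks.values()
--                       if 'engage' in p.get('tags', {}).get('role', []))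
--     if engage_count == 0:
--         weaknesses.append("Limited engage potential")
--
--     # Check damage profile
--     ap_count = sum(1 for p in picks.values() if 'Mage' in p.get('tags', {}).get('class', []))
--     if ap_count == 0:
--         weaknesses.append("Full AD comp (easy to itemize against)")
--     elif ap_count >= 4:
--         weaknesses.append("Full AP comp (vulnerable to MR stacking)")
--
--     return weaknesses[:3]  # Top 3 weaknesses
-- ===== SOURCE B (Python) =====
-- from typing import Dict, List
--
--
-- def _identify_comp_weaknesses(picks: Dict[str, Dict], comp_type: str) -> List[str]:
--     """Identify team composition weaknesses (single pass over the picks)."""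
--     tank_count = 0
--     engage_count = 0
--     ap_count = 0
--     for p in picks.values():
--         tags = p.get('tags', {})
--         classes = tags.get('class', [])
--         roles = tags.get('role', [])
--         if 'Tank' in classes:
--             tank_count += 1
--         if 'engage' in roles:
--             engage_count += 1
--         if 'Mage' in classes:
--             ap_count += 1
--
--     weaknesses = []
--     if tank_count == 0:
--         weaknesses.append("Lacks frontline/tankiness")
--     if engage_count == 0:
--         weaknesses.append("Limited engage potential")
--     if ap_count == 0:
--         weaknesses.append("Full AD comp (easy to itemize against)")
--     elif ap_count >= 4:
--         weaknesses.append("Full AP comp (vulnerable to MR stacking)")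
--     return weaknesses  # at most 3 entries can ever be appended
-- ===== Notes on version B (the rewrite author's own statement) =====
-- stated objective: simpler
-- what changed: Replaces A's three separate whole-dict counting comprehensions with one loop over picks.values() that reads each pick's tags once and maintains three counters, and drops the pointless [:3] slice (the list can never exceed three entries).
import Mathlib
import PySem

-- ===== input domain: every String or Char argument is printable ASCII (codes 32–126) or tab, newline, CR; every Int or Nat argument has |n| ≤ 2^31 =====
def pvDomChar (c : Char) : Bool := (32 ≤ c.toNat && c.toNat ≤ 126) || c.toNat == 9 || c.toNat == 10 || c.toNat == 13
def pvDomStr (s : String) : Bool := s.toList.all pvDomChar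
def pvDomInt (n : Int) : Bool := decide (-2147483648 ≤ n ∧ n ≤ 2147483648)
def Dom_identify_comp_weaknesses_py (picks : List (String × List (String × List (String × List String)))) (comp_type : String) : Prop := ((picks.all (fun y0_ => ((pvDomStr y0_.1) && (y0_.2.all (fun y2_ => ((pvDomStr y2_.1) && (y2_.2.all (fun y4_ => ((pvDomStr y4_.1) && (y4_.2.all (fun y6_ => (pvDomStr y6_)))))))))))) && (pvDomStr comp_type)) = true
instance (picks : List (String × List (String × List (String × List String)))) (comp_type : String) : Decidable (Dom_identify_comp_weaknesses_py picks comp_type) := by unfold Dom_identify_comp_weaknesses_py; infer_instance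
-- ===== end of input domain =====

-- B replaces A's three separate counting comprehensions over picks.values() by a single
-- loop maintaining three counters and drops the no-op [:3] slice (objective: simpler).

-- shared helper: Python's dict.get(k, dflt) on an association list (first match)
def pyGetD {α : Type} (d : List (String × α)) (k : String) (dflt : α) : α :=
  match d.find? (fun kv => kv.1 == k) with
  | some kv => kv.2
  | none => dflt

-- ===== PORT A =====
def identify_comp_weaknesses_py (picks : List (String × List (String × List (String × List String)))) (comp_type : String) : List String :=
  let weaknesses : List String := []
  -- tank_count = sum(1 for p in picks.values() if 'Tank' in p.get('tags', {}).get('class', []))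
  let tank_count : Int :=
    ((picks.map (·.2)).countP (fun p => (pyGetD (pyGetD p "tags" []) "class" []).contains "Tank") : Nat)
  let weaknesses := if tank_count = 0 then weaknesses ++ ["Lacks frontline/tankiness"] else weaknesses
  let engage_count : Int :=
    ((picks.map (·.2)).countP (fun p => (pyGetD (pyGetD p "tags" []) "role" []).contains "engage") : Nat)
  let weaknesses := if engage_count = 0 then weaknesses ++ ["Limited engage potential"] else weaknesses
  let ap_count : Int :=
    ((picks.map (·.2)).countP (fun p => (pyGetD (pyGetD p "tags" []) "class" []).contains "Mage") : Nat)
  let weaknesses :=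
    if ap_count = 0 then weaknesses ++ ["Full AD comp (easy to itemize against)"]
    else if 4 ≤ ap_count then weaknesses ++ ["Full AP comp (vulnerable to MR stacking)"]
    else weaknesses
  PySem.List.slice weaknesses none (some 3)   -- weaknesses[:3]

-- ===== PORT B =====
-- the loop body: read the pick's tags once, bump the three counters
def pvStep (acc : Int × Int × Int) (pair : String × List (String × List (String × List String))) : Int × Int × Int :=
  let tags := pyGetD pair.2 "tags" []
  let classes := pyGetD tags "class" []
  let roles := pyGetD tags "role" []
  let acc := if classes.contains "Tank" then (acc.1 + 1, acc.2.1, acc.2.2) else acc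
  let acc := if roles.contains "engage" then (acc.1, acc.2.1 + 1, acc.2.2) else acc
  if classes.contains "Mage" then (acc.1, acc.2.1, acc.2.2 + 1) else acc

def identify_comp_weaknesses_py_alt (picks : List (String × List (String × List (String × List String)))) (comp_type : String) : List String :=
  let c := picks.foldl pvStep (0, 0, 0)
  let weaknesses : List String := []
  let weaknesses := if c.1 = 0 then weaknesses ++ ["Lacks frontline/tankiness"] else weaknesses
  let weaknesses := if c.2.1 = 0 then weaknesses ++ ["Limited engage potential"] else weaknesses
  if c.2.2 = 0 then weaknesses ++ ["Full AD comp (easy to itemize against)"]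
  else if 4 ≤ c.2.2 then weaknesses ++ ["Full AP comp (vulnerable to MR stacking)"]
  else weaknesses

-- ===== PRECONDITION & SPEC =====
def Spec_identify_comp_weaknesses_py (picks : List (String × List (String × List (String × List String)))) (comp_type : String) (out : List String) : Prop := out = identify_comp_weaknesses_py_alt picks comp_type
instance (picks : List (String × List (String × List (String × List String)))) (comp_type : String) (out : List String) : Decidable (Spec_identify_comp_weaknesses_py picks comp_type out) := by unfold Spec_identify_comp_weaknesses_py; infer_instance

-- ===== CLAIM (what is proved, stated in full; the proofs are below) =====
def Claim_equal_identify_comp_weaknesses_py : Prop := ∀ (picks : List (String × List (String × List (String × List String)))) (comp_type : String), Dom_identify_comp_weaknesses_py picks comp_type → Spec_identify_comp_weaknesses_py picks comp_type (identify_comp_weaknesses_py picks comp_type)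

-- ===== LEMMAS AND PROOFS =====

-- the single fold computes the three counts of A's three comprehensions
theorem pvStep_foldl_counts (l : List (String × List (String × List (String × List String)))) (t e a : Int) :
    l.foldl pvStep (t, e, a) =
      (t + ((l.map (·.2)).countP (fun p => (pyGetD (pyGetD p "tags" []) "class" []).contains "Tank") : Nat),
       e + ((l.map (·.2)).countP (fun p => (pyGetD (pyGetD p "tags" []) "role" []).contains "engage") : Nat),
       a + ((l.map (·.2)).countP (fun p => (pyGetD (pyGetD p "tags" []) "class" []).contains "Mage") : Nat)) := by
  induction l generalizing t e a with
  | nil => simp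
  | cons x xs ih =>
    simp only [List.foldl_cons, List.map_cons, List.countP_cons, pvStep]
    split_ifs <;> rw [ih] <;> simp only [Prod.mk.injEq] <;> push_cast <;> omega

-- at most three entries get appended, so the trailing [:3] slice of A is a no-op
theorem pv_slice3 (xs : List String) (h : xs.length ≤ 3) :
    PySem.List.slice xs none (some 3) = xs := by
  have : PySem.List.slice xs none (some ((3 : Nat) : Int)) = xs.take 3 :=
    PySem.List.slice_to_natCast xs 3
  simpa [List.take_of_length_le h] using this

-- ===== VERDICT (by name: the statement is the Claim_ definition above) =====
theorem identify_comp_weaknesses_py_spec : Claim_equal_identify_comp_weaknesses_py := by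
  intro picks comp_type _
  unfold Spec_identify_comp_weaknesses_py
  unfold identify_comp_weaknesses_py identify_comp_weaknesses_py_alt
  rw [pvStep_foldl_counts]
  simp only [zero_add]
  split_ifs <;> apply pv_slice3 <;> simp
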